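-- pv_equiv track=rewrite | github.com/MarcoYou/OpenProxy_MCP | open_proxy_mcp/services/proxy_guideline_scoring.py | score_bundled_slate_signal
-- ===== SOURCE A (Python) =====
-- from typing import Any
--
-- SCORE_GREEN = 2
--
-- SCORE_YELLOW = 1
--
-- SCORE_RED = 0
--
-- def score_bundled_slate_signal(
--     appointments: list[dict[str, Any]],
--     other_dim_scores: dict[str, int],
-- ) -> int | None:
--     """묶음 선임 + 한 명이라도 거버넌스 결격.
--
--     green: 개별 표결 또는 묶음 + 모든 후보 격조 양호
--     yellow: 묶음 + 일부 후보 yellow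
--     red: 묶음 + 한 명이라도 다른 dim red
--     """
--     if not appointments:
--         return None
--     bundled = any(len(a.get("candidates", []) or []) >= 2 for a in appointments)
--     if not bundled:
--         return SCORE_GREEN
--
--     # 다른 dim의 red/yellow signal 활용
--     red_count = sum(1 for v in other_dim_scores.values() if v == SCORE_RED)
--     yellow_count = sum(1 for v in other_dim_scores.values() if v == SCORE_YELLOW)
--     if red_count >= 1:
--         return SCORE_RED
--     if yellow_count >= 2:
--         return SCORE_YELLOW
--     return SCORE_GREEN
-- ===== SOURCE B (Python) =====
-- from typing import Any
--
-- SCORE_GREEN = 2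
-- SCORE_YELLOW = 1
-- SCORE_RED = 0
--
-- def score_bundled_slate_signal(
--     appointments: list[dict[str, Any]],
--     other_dim_scores: dict[str, int],
-- ) -> int | None:
--     if not appointments:
--         return None
--     # search loop with early break instead of any()
--     for a in appointments:
--         if len(a.get("candidates", []) or []) >= 2:
--             break
--     else:
--         return SCORE_GREEN
--     # ONE short-circuit pass: return RED at the first red seen,
--     # accumulating yellows along the way (A makes two full counting scans).
--     yellows = 0
--     for v in other_dim_scores.values():
--         if v == SCORE_RED:
--             return SCORE_RED
--         if v == SCORE_YELLOW:
--             yellows += 1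
--     return SCORE_YELLOW if yellows >= 2 else SCORE_GREEN
-- ===== Notes on version B (the rewrite author's own statement) =====
-- stated objective: alternative
-- what changed: Replaces A's two full filtered sum() scans over the score values with one short-circuit pass that returns RED immediately at the first red and accumulates yellows as it goes, and replaces the any() bundled test with a search loop using for/else break; correct because RED wins regardless of later values and the yellow threshold only matters when no red exists.
import Mathlib
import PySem

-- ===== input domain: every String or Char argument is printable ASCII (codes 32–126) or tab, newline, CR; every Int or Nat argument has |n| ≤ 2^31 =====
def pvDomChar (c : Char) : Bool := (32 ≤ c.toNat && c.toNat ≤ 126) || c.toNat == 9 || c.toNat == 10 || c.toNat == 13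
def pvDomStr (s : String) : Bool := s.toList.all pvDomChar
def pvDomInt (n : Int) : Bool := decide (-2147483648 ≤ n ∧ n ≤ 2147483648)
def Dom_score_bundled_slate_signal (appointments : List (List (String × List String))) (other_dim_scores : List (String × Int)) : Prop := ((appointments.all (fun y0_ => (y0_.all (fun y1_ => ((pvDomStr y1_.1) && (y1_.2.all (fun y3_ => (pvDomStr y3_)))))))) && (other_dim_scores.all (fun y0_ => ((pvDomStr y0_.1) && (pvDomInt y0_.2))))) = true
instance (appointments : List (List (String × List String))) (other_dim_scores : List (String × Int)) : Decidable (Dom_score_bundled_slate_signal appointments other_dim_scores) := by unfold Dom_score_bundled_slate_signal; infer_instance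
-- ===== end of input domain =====

-- B replaces A's two full filtered sum() scans with ONE short-circuit pass (return RED at the
-- first red, accumulate yellows) and a for/else search loop for the bundled check: alternative.

-- ===== PORT A =====
-- A, transliterated: empty guard; any-bundled check; two filtered counting folds over the dict values.
def score_bundled_slate_signal (appointments : List (List (String × List String))) (other_dim_scores : List (String × Int)) : Option Int :=
  if appointments = [] then none
  else
    let bundled := appointments.any (fun a =>
      let c := PySem.Dict.getD (PySem.Dict.ofList a) "candidates" []
      let c := if c = [] then [] else c   -- `or []`
      decide (2 ≤ c.length))
    if bundled = false then some 2
    else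
      let vals := PySem.Dict.values (PySem.Dict.ofList other_dim_scores)
      let red_count := vals.foldl (fun acc v => if v = 0 then acc + 1 else acc) (0 : Int)
      let yellow_count := vals.foldl (fun acc v => if v = 1 then acc + 1 else acc) (0 : Int)
      if 1 ≤ red_count then some 0
      else if 2 ≤ yellow_count then some 1
      else some 2

-- ===== PORT B =====
-- B's for/else search loop over appointments: true iff it breaks (a bundled slate is found).
def pvFindBundled : List (List (String × List String)) → Bool
  | [] => false
  | a :: rest =>
      if 2 ≤ (let c := PySem.Dict.getD (PySem.Dict.ofList a) "candidates" []
              if c = [] then ([] : List String) else c).length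
      then true else pvFindBundled rest

-- B's single short-circuit pass: first red returns immediately, yellows accumulate.
def pvScan : List Int → Int → Int
  | [], yellows => if 2 ≤ yellows then 1 else 2
  | v :: rest, yellows =>
      if v = 0 then 0
      else pvScan rest (if v = 1 then yellows + 1 else yellows)

def score_bundled_slate_signal_alt (appointments : List (List (String × List String))) (other_dim_scores : List (String × Int)) : Option Int :=
  if appointments = [] then none
  else if pvFindBundled appointments = false then some 2
  else some (pvScan (PySem.Dict.values (PySem.Dict.ofList other_dim_scores)) 0)

-- ===== PRECONDITION & SPEC =====
def Spec_score_bundled_slate_signal (appointments : List (List (String × List String))) (other_dim_scores : List (String × Int)) (out : Option Int) : Prop := out = score_bundled_slate_signal_alt appointments other_dim_scores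
instance (appointments : List (List (String × List String))) (other_dim_scores : List (String × Int)) (out : Option Int) : Decidable (Spec_score_bundled_slate_signal appointments other_dim_scores out) := by unfold Spec_score_bundled_slate_signal; infer_instance

-- ===== CLAIM (what is proved, stated in full; the proofs are below) =====
def Claim_equal_score_bundled_slate_signal : Prop := ∀ (appointments : List (List (String × List String))) (other_dim_scores : List (String × Int)), Dom_score_bundled_slate_signal appointments other_dim_scores → Spec_score_bundled_slate_signal appointments other_dim_scores (score_bundled_slate_signal appointments other_dim_scores)

-- ===== LEMMAS AND PROOFS =====

-- A's filtered counting fold equals the list count.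
theorem pv_foldl_count (k : Int) (l : List Int) (acc : Int) :
    l.foldl (fun acc v => if v = k then acc + 1 else acc) acc = acc + l.count k := by
  induction l generalizing acc with
  | nil => simp
  | cons x xs ih =>
      simp only [List.foldl, List.count_cons, ih]
      by_cases h : x = k
      · simp [h]; ring
      · simp [h, beq_iff_eq]

-- B's search loop computes the same boolean as A's any().
theorem pv_find_eq_any (l : List (List (String × List String))) :
    pvFindBundled l
    = l.any (fun a =>
        let c := PySem.Dict.getD (PySem.Dict.ofList a) "candidates" []
        let c := if c = [] then [] else c
        decide (2 ≤ c.length)) := by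
  induction l with
  | nil => rfl
  | cons x xs ih =>
      simp only [pvFindBundled, List.any_cons, ← ih]
      split
      · next h => simp
      · next h => simp

-- B's short-circuit scan, characterised by the two counts A computes.
theorem pv_scan_eq (vals : List Int) (y : Int) :
    pvScan vals y
    = if 1 ≤ vals.count 0 then 0
      else if 2 ≤ y + vals.count 1 then 1 else 2 := by
  induction vals generalizing y with
  | nil => simp [pvScan]
  | cons v rest ih =>
      simp only [pvScan, ih, List.count_cons]
      by_cases h0 : v = 0 <;> by_cases h1 : v = 1 <;>
        simp only [h0, h1, if_true, if_false] <;>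
        simp [h0, h1] <;> split_ifs <;> omega

-- ===== VERDICT (by name: the statement is the Claim_ definition above) =====
theorem score_bundled_slate_signal_spec : Claim_equal_score_bundled_slate_signal := by
  intro appointments other _
  unfold Spec_score_bundled_slate_signal
  unfold score_bundled_slate_signal score_bundled_slate_signal_alt
  by_cases he : appointments = []
  · simp [he]
  · simp only [he, if_false, pv_find_eq_any]
    cases hb : appointments.any (fun a =>
      let c := PySem.Dict.getD (PySem.Dict.ofList a) "candidates" []
      let c := if c = [] then [] else c
      decide (2 ≤ c.length)) with
    | false => simp
    | true =>
        simp only [Bool.true_eq_false, if_false, pv_foldl_count, pv_scan_eq, zero_add]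
        split_ifs <;> first | rfl | (exfalso; omega)
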